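-- pv_equiv track=rewrite | github.com/nsonbao261/AIproject-GemHunter | main.py | cellCnf
-- ===== SOURCE A (Python) =====
-- from itertools import combinations
--
-- def cellCnf(original_list, number):
--     # Generate all possible combinations of indices to place negative values
--     index_combinations = combinations(range(len(original_list)), number)
--
--     # Generate lists with exactly two negative values
--     result_lists = []
--     for indices in index_combinations:
--         new_list = original_list.copy()
--         for index in indices:
--             new_list[index] *= -1
--         result_lists.append(new_list)
--
--     return result_lists
-- ===== SOURCE B (Python) =====
-- def cellCnf(original_list, number):
--     # Recursive backtracking over index positions (flip-first, then skip),
--     # which reproduces itertools.combinations' lexicographic order.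
--     if number < 0:
--         return []
--     n = len(original_list)
--     result = []
--
--     def go(i, k, acc):
--         if k == 0:
--             result.append(acc + original_list[i:])
--             return
--         if n - i < k:
--             return
--         go(i + 1, k - 1, acc + [-original_list[i]])
--         go(i + 1, k, acc + [original_list[i]])
--
--     go(0, number, [])
--     return result
-- ===== Notes on version B (the rewrite author's own statement) =====
-- stated objective: alternative
-- what changed: Replaces the itertools.combinations-over-indices + copy-and-mutate loop with a hand-written recursive backtracking generator that builds each output list incrementally (flip current element first, then skip), reproducing combinations' lexicographic order.
-- outside the precondition, e.g. on cellCnf([1], -1): A raises ValueError, B returns []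
import Mathlib
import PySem

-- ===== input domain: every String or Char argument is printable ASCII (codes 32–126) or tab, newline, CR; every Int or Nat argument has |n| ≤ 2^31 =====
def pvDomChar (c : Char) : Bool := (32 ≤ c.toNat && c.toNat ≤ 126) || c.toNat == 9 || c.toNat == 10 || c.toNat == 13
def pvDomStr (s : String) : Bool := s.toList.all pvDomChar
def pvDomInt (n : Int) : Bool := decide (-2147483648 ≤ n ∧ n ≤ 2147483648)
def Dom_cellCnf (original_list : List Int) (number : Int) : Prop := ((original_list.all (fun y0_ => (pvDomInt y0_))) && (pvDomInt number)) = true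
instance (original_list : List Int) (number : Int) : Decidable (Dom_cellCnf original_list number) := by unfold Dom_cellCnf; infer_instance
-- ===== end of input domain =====

-- B replaces the combinations-of-indices + copy-and-mutate loop of A by recursive
-- backtracking that builds each output incrementally (alternative decomposition, same cost).

-- ===== PORT A =====
-- itertools.combinations(s, k) over an explicit list s, in its lexicographic order
def pvCombos (s : List Nat) (k : Nat) : List (List Nat) :=
  match k, s with
  | 0, _ => [[]]
  | _ + 1, [] => []
  | k + 1, x :: rest => (pvCombos rest k).map (x :: ·) ++ pvCombos rest (k + 1)

def cellCnf (original_list : List Int) (number : Int) : List (List Int) :=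
  -- number.toNat: Pre_ restricts to 0 ≤ number (combinations raises ValueError otherwise)
  (pvCombos (List.range original_list.length) number.toNat).map
    (fun indices => indices.foldl (fun nl index => nl.modify index (· * -1)) original_list)

-- ===== PORT B =====
-- the nested 'go' of Source B; 'result.append' becomes list concatenation of the two branches
def cellCnfGo (original_list : List Int) (n : Nat) (i : Nat) (k : Nat) (acc : List Int) :
    List (List Int) :=
  if k = 0 then [acc ++ original_list.drop i]   -- original_list[i:] with 0 ≤ i
  else if n - i < k then []
  else
    cellCnfGo original_list n (i + 1) (k - 1) (acc ++ [-(original_list.getD i 0)]) ++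
    cellCnfGo original_list n (i + 1) k (acc ++ [original_list.getD i 0])
termination_by n - i
decreasing_by all_goals omega

def cellCnf_alt (original_list : List Int) (number : Int) : List (List Int) :=
  if number < 0 then [] else
  cellCnfGo original_list original_list.length 0 number.toNat []

-- ===== PRECONDITION & SPEC =====
-- Pre_ excludes number < 0, where A raises ValueError (itertools.combinations).
def Pre_cellCnf (original_list : List Int) (number : Int) : Prop := 0 ≤ number
instance (original_list : List Int) (number : Int) : Decidable (Pre_cellCnf original_list number) := by unfold Pre_cellCnf; infer_instance
def pvWitness_cellCnf : List Int × Int := ([1, 2, 3], 2)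

def Spec_cellCnf (original_list : List Int) (number : Int) (out : List (List Int)) : Prop := out = cellCnf_alt original_list number
instance (original_list : List Int) (number : Int) (out : List (List Int)) : Decidable (Spec_cellCnf original_list number out) := by unfold Spec_cellCnf; infer_instance

-- ===== CLAIM (what is proved, stated in full; the proofs are below) =====
def Claim_equal_cellCnf : Prop := ∀ (original_list : List Int) (number : Int), Dom_cellCnf original_list number → Pre_cellCnf original_list number → Spec_cellCnf original_list number (cellCnf original_list number)

-- ===== LEMMAS AND PROOFS =====

-- l with the entries whose absolute position (counting from j) is in c negated
def pvFl (l : List Int) (j : Nat) (c : List Nat) : List Int :=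
  match l with
  | [] => []
  | x :: xs => (if j ∈ c then -x else x) :: pvFl xs (j + 1) c

theorem pvFl_nil (l : List Int) (j : Nat) : pvFl l j [] = l := by
  induction l generalizing j with
  | nil => rfl
  | cons x xs ih => simp [pvFl, ih]

theorem pvFl_length (l : List Int) (j : Nat) (c : List Nat) : (pvFl l j c).length = l.length := by
  induction l generalizing j with
  | nil => rfl
  | cons x xs ih => simp [pvFl, ih]

theorem pvFl_getElem (l : List Int) (j : Nat) (c : List Nat) (m : Nat) (h : m < l.length) :
    (pvFl l j c)[m]'(by rw [pvFl_length]; exact h) =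
      if j + m ∈ c then -(l[m]'h) else l[m]'h := by
  induction l generalizing j m with
  | nil => simp at h
  | cons x xs ih =>
    cases m with
    | zero => simp [pvFl]
    | succ m =>
      simp only [pvFl, List.getElem_cons_succ]
      rw [show j + (m + 1) = (j + 1) + m by omega]
      exact ih (j + 1) m (by simpa using h)

theorem pvFl_cons_lt (l : List Int) (j a : Nat) (c : List Nat) (h : a < j) :
    pvFl l j (a :: c) = pvFl l j c := by
  induction l generalizing j with
  | nil => rfl
  | cons x xs ih =>
    simp only [pvFl]
    rw [ih (j + 1) (by omega)]
    congr 1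
    have : (j ∈ a :: c) ↔ (j ∈ c) := by
      constructor
      · intro hm; rcases List.mem_cons.1 hm with h' | h' <;> [omega; exact h']
      · exact fun hm => List.mem_cons.2 (Or.inr hm)
    by_cases hj : j ∈ c <;> simp [this, hj]

theorem pvCombos_nil_of_lt (s : List Nat) (k : Nat) (h : s.length < k) : pvCombos s k = [] := by
  induction s generalizing k with
  | nil => cases k with | zero => omega | succ k => rfl
  | cons x rest ih =>
    cases k with
    | zero => omega
    | succ k =>
      simp only [pvCombos]
      rw [ih k (by simpa using h), ih (k + 1) (by simp at h ⊢; omega)]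
      rfl

theorem pvCombos_subset (s : List Nat) (k : Nat) (c : List Nat) (hc : c ∈ pvCombos s k) :
    ∀ a ∈ c, a ∈ s := by
  induction s generalizing k c with
  | nil =>
    cases k with
    | zero => simp [pvCombos] at hc; simp [hc]
    | succ k => simp [pvCombos] at hc
  | cons x rest ih =>
    cases k with
    | zero => simp [pvCombos] at hc; simp [hc]
    | succ k =>
      simp only [pvCombos, List.mem_append, List.mem_map] at hc
      rcases hc with ⟨c', hc', rfl⟩ | hc
      · intro a ha
        rcases List.mem_cons.1 ha with rfl | ha
        · exact List.mem_cons_self ..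
        · exact List.mem_cons.2 (Or.inr (ih k c' hc' a ha))
      · intro a ha
        exact List.mem_cons.2 (Or.inr (ih (k + 1) c hc a ha))

theorem pvCombos_pairwise (s : List Nat) (k : Nat) (c : List Nat)
    (hs : s.Pairwise (· < ·)) (hc : c ∈ pvCombos s k) : c.Pairwise (· < ·) := by
  induction s generalizing k c with
  | nil =>
    cases k with
    | zero => simp [pvCombos] at hc; simp [hc]
    | succ k => simp [pvCombos] at hc
  | cons x rest ih =>
    rcases List.pairwise_cons.1 hs with ⟨hx, hrest⟩
    cases k with
    | zero => simp [pvCombos] at hc; simp [hc]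
    | succ k =>
      simp only [pvCombos, List.mem_append, List.mem_map] at hc
      rcases hc with ⟨c', hc', rfl⟩ | hc
      · exact List.pairwise_cons.2
          ⟨fun a ha => hx a (pvCombos_subset rest k c' hc' a ha), ih k c' hrest hc'⟩
      · exact ih (k + 1) c hrest hc

-- A's inner loop equals the membership flip, for duplicate-free index lists
theorem foldl_modify_eq_pvFl (c : List Nat) (l : List Int) (hnd : c.Nodup) :
    c.foldl (fun nl index => nl.modify index (· * -1)) l = pvFl l 0 c := by
  induction c generalizing l with
  | nil => simp [pvFl_nil]
  | cons a c ih =>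
    rcases List.nodup_cons.1 hnd with ⟨hna, hnd'⟩
    rw [List.foldl_cons, ih _ hnd']
    apply List.ext_getElem
    · simp [pvFl_length]
    · intro m h1 h2
      rw [pvFl_getElem _ _ _ _ (by simpa [pvFl_length] using h1),
          pvFl_getElem _ _ _ _ (by simpa [pvFl_length] using h2),
          List.getElem_modify]
      by_cases hma : a = m
      · subst hma
        simp [hna, List.mem_cons]
      · simp only [if_neg hma, Nat.zero_add, List.mem_cons]
        have : ¬ m = a := fun h => hma h.symm
        by_cases hmc : m ∈ c <;> simp [hmc, this]

-- the main invariant of B's recursion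
theorem cellCnfGo_eq (l : List Int) :
    ∀ d i k acc, l.length - i = d →
      cellCnfGo l l.length i k acc =
        (pvCombos (List.range' i (l.length - i)) k).map
          (fun c => acc ++ pvFl (l.drop i) i c) := by
  intro d
  induction d with
  | zero =>
    intro i k acc hd
    rw [cellCnfGo]
    by_cases hk : k = 0
    · subst hk; simp [pvCombos, pvFl_nil]
    · rw [if_neg hk, if_pos (by omega),
          pvCombos_nil_of_lt (List.range' i (l.length - i)) k (by simp; omega)]
      simp
  | succ d ih =>
    intro i k acc hd
    rw [cellCnfGo]
    by_cases hk : k = 0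
    · subst hk; simp [pvCombos, pvFl_nil]
    · by_cases hlt : l.length - i < k
      · rw [if_neg hk, if_pos hlt,
            pvCombos_nil_of_lt (List.range' i (l.length - i)) k (by simp; omega)]
        simp
      · rw [if_neg hk, if_neg hlt]
        obtain ⟨k', rfl⟩ : ∃ k', k = k' + 1 := ⟨k - 1, by omega⟩
        have hi : i < l.length := by omega
        have hgetD : l.getD i 0 = l[i] := by
          simp [List.getD_eq_getElem?_getD, List.getElem?_eq_getElem hi]
        have hdrop : l.drop i = l[i] :: l.drop (i + 1) := (List.getElem_cons_drop hi).symm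
        rw [show k' + 1 - 1 = k' from rfl, ih (i + 1) k' _ (by omega), ih (i + 1) (k' + 1) _ (by omega),
            show l.length - i = (l.length - (i + 1)) + 1 by omega, List.range'_succ]
        simp only [pvCombos, List.map_append, List.map_map]
        congr 1
        · apply List.map_congr_left
          intro c hc
          have hlow : ∀ a ∈ c, i + 1 ≤ a := fun a ha => by
            have := pvCombos_subset _ _ c hc a ha
            simp [List.mem_range'_1] at this; omega
          simp only [Function.comp, hgetD, hdrop, pvFl]
          rw [pvFl_cons_lt _ _ _ _ (by omega)]
          simp [List.append_assoc]
        · apply List.map_congr_left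
          intro c hc
          have hnot : i ∉ c := fun hmem => by
            have := pvCombos_subset _ _ c hc i hmem
            simp [List.mem_range'_1] at this
          simp only [hgetD, hdrop, pvFl, if_neg hnot]
          simp [List.append_assoc]

theorem cellCnf_eq (l : List Int) (k : Nat) :
    cellCnfGo l l.length 0 k [] = (pvCombos (List.range l.length) k).map (fun c => pvFl l 0 c) := by
  rw [cellCnfGo_eq l (l.length) 0 k [] rfl, List.range_eq_range']
  simp

-- ===== VERDICT (by name: the statement is the Claim_ definition above) =====
theorem cellCnf_spec : Claim_equal_cellCnf := by
  intro l number _ hpre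
  unfold Spec_cellCnf cellCnf cellCnf_alt
  rw [if_neg (by exact not_lt.2 hpre)]
  rw [cellCnf_eq]
  apply List.map_congr_left
  intro c hc
  have hpw : c.Pairwise (· < ·) :=
    pvCombos_pairwise _ _ c (by simpa using List.pairwise_lt_range) hc
  exact foldl_modify_eq_pvFl c l hpw.nodup
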